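-- pv_equiv track=rewrite | github.com/DanielYu2004/CCC-Senior-Solutions | 2011/CCC 2011 S5/S5.py | convert
-- ===== SOURCE A (Python) =====
-- def convert(array):
--     for i in range(len(array) - 3):
--         if (array[i] == array[i+1] and array[i] == array[i+2] and array[i] == array[i+3] and array[i] == 1):
--             for t in range(len(array) - i):
--                 if (array[i+t] == 1):
--                     array[i+t] = 0
--                 else:
--                     break
--     return array
-- ===== SOURCE B (Python) =====
-- def convert(array):
--     # Run-based rewrite: zero each maximal run of 1s of length >= 4; mutates array in place like A.
--     out = []
--     n = len(array)
--     i = 0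
--     while i < n:
--         j = i
--         while j < n and array[j] == array[i]:
--             j += 1
--         if array[i] == 1 and j - i >= 4:
--             out.extend([0] * (j - i))
--         else:
--             out.extend(array[i:j])
--         i = j
--     array[:] = out
--     return array
-- ===== Notes on version B (the rewrite author's own statement) =====
-- stated objective: simpler
-- what changed: Replaces the sliding four-window trigger plus zero-forward inner loop with a single pass that segments the list into maximal runs of equal elements and rewrites each run of 1s of length >= 4 as zeros.
import Mathlib
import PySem

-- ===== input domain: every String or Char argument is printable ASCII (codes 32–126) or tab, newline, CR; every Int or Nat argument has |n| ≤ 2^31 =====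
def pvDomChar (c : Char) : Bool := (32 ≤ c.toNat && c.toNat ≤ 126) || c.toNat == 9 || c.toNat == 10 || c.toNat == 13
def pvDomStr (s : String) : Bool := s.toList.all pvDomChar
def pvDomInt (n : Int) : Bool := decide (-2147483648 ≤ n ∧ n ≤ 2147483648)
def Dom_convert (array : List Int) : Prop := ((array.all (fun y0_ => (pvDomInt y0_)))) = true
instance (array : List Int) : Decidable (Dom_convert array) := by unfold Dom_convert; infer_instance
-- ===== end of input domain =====

-- B replaces A's sliding four-window trigger with its quadratic zero-forward inner loop by a
-- single run-segmentation pass (zero every maximal run of 1s of length >= 4); A mutates its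
-- argument in place in Python and B performs the same in-place update via array[:] = out,
-- the theorems here are about the returned value.


-- ===== PORT A =====
-- inner loop: 'for t in range(len(array) - i): if array[i+t] == 1: array[i+t] = 0 else: break'
def convertInner (arr : List Int) (i : Int) : List Int → List Int
  | [] => arr
  | t :: ts =>
    if PySem.List.pyGetD arr (i + t) 0 = 1 then
      convertInner (PySem.List.pySetD arr (i + t) 0) i ts
    else arr

-- body of the outer 'for i in range(len(array) - 3)' loop
def convertStep (arr : List Int) (i : Int) : List Int :=
  if PySem.List.pyGetD arr i 0 = PySem.List.pyGetD arr (i + 1) 0 ∧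
     PySem.List.pyGetD arr i 0 = PySem.List.pyGetD arr (i + 2) 0 ∧
     PySem.List.pyGetD arr i 0 = PySem.List.pyGetD arr (i + 3) 0 ∧
     PySem.List.pyGetD arr i 0 = 1 then
    convertInner arr i (PySem.List.pyRange 0 ((arr.length : Int) - i) 1)
  else arr

def convert (array : List Int) : List Int :=
  (PySem.List.pyRange 0 ((array.length : Int) - 3) 1).foldl convertStep array

-- ===== PORT B =====
-- run segmentation: the inner 'while j < n and array[j] == array[i]' is takeWhile/dropWhile
def convert_alt : List Int → List Int
  | [] => []
  | x :: xs =>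
    let run := xs.takeWhile (fun y => y == x)
    let rest := xs.dropWhile (fun y => y == x)
    (if x = 1 ∧ 4 ≤ run.length + 1 then List.replicate (run.length + 1) 0 else x :: run)
      ++ convert_alt rest
termination_by l => l.length
decreasing_by exact Nat.lt_succ_of_le (List.length_dropWhile_le _ _)

-- ===== PRECONDITION & SPEC =====
def Spec_convert (array : List Int) (out : List Int) : Prop := out = convert_alt array
instance (array : List Int) (out : List Int) : Decidable (Spec_convert array out) := by unfold Spec_convert; infer_instance

-- ===== CLAIM (what is proved, stated in full; the proofs are below) =====
def Claim_equal_convert : Prop := ∀ (array : List Int), Dom_convert array → Spec_convert array (convert array)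

-- ===== LEMMAS AND PROOFS =====

theorem pyGetD_shift (p s : List Int) (j : Int) (hj : 0 ≤ j) :
    PySem.List.pyGetD (p ++ s) ((p.length : Int) + j) 0 = PySem.List.pyGetD s j 0 := by
  obtain ⟨k, rfl⟩ := Int.eq_ofNat_of_zero_le hj
  have h : ((p.length : Int) + (k : Int)) = ((p.length + k : Nat) : Int) := by push_cast; ring
  rw [h, PySem.List.pyGetD_natCast, PySem.List.pyGetD_natCast]
  simp [List.getD, List.getElem?_append_right]

theorem pySetD_shift (p s : List Int) (j : Int) (hj : 0 ≤ j) (v : Int) :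
    PySem.List.pySetD (p ++ s) ((p.length : Int) + j) v = p ++ PySem.List.pySetD s j v := by
  obtain ⟨k, rfl⟩ := Int.eq_ofNat_of_zero_le hj
  have h : ((p.length : Int) + (k : Int)) = ((p.length + k : Nat) : Int) := by push_cast; ring
  rw [h, PySem.List.pySetD_natCast, PySem.List.pySetD_natCast,
    List.set_append_right _ _ (by omega)]
  simp

theorem convertInner_shift (ts : List Int) : ∀ (p s : List Int) (j : Int), 0 ≤ j →
    (∀ t ∈ ts, 0 ≤ t) →
    convertInner (p ++ s) ((p.length : Int) + j) ts = p ++ convertInner s j ts := by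
  induction ts with
  | nil => intro p s j _ _; rfl
  | cons t ts ih =>
    intro p s j hj hts
    have ht : 0 ≤ t := hts t (by simp)
    have hadd : (p.length : Int) + j + t = (p.length : Int) + (j + t) := by ring
    rw [convertInner, convertInner, hadd, pyGetD_shift p s (j + t) (by omega)]
    split
    · rw [pySetD_shift p s (j + t) (by omega), ih p _ j hj (fun u hu => hts u (by simp [hu]))]
    · rfl

theorem convertStep_shift (p s : List Int) (j : Int) (hj : 0 ≤ j) :
    convertStep (p ++ s) ((p.length : Int) + j) = p ++ convertStep s j := by
  unfold convertStep
  have h1 : (p.length : Int) + j + 1 = (p.length : Int) + (j + 1) := by ring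
  have h2 : (p.length : Int) + j + 2 = (p.length : Int) + (j + 2) := by ring
  have h3 : (p.length : Int) + j + 3 = (p.length : Int) + (j + 3) := by ring
  rw [h1, h2, h3, pyGetD_shift p s j hj, pyGetD_shift p s _ (by omega),
    pyGetD_shift p s _ (by omega), pyGetD_shift p s _ (by omega)]
  split
  · have hlen : ((p ++ s).length : Int) - ((p.length : Int) + j) = (s.length : Int) - j := by
      simp only [List.length_append]; push_cast; ring
    rw [hlen]
    exact convertInner_shift _ p s j hj
      (fun t ht => ((PySem.List.mem_pyRange_one).mp ht).1)
  · rfl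

theorem fold_shift (l : List Int) : ∀ (p s : List Int), (∀ j ∈ l, 0 ≤ j) →
    List.foldl convertStep (p ++ s) (l.map (fun j => (p.length : Int) + j)) =
      p ++ List.foldl convertStep s l := by
  induction l with
  | nil => intro p s _; rfl
  | cons j l ih =>
    intro p s hl
    simp only [List.map_cons, List.foldl_cons]
    rw [convertStep_shift p s j (hl j (by simp))]
    exact ih p _ (fun u hu => hl u (by simp [hu]))

theorem range_shift (c m : Int) :
    PySem.List.pyRange c (c + m) 1 = (PySem.List.pyRange 0 m 1).map (fun j => c + j) := by
  rw [PySem.List.pyRange_one, PySem.List.pyRange_one]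
  simp [Function.comp_def]

theorem foldl_fix {α β : Type} (f : α → β → α) (a : α) (l : List β)
    (h : ∀ i ∈ l, f a i = a) : List.foldl f a l = a := by
  induction l with
  | nil => rfl
  | cons j l ih => simp only [List.foldl_cons, h j (by simp)]; exact ih (fun u hu => h u (by simp [hu]))

theorem getD_run (L : Nat) (v : Int) (rest : List Int) (i : Int) (h0 : 0 ≤ i) (hL : i < (L : Int)) :
    PySem.List.pyGetD (List.replicate L v ++ rest) i 0 = v := by
  obtain ⟨k, rfl⟩ := Int.eq_ofNat_of_zero_le h0
  rw [PySem.List.pyGetD_natCast]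
  have hk : k < L := by exact_mod_cast hL
  simp [List.getD, List.getElem?_append_left, hk]

theorem getD_boundary (L : Nat) (v y : Int) (ys : List Int) :
    PySem.List.pyGetD (List.replicate L v ++ y :: ys) (L : Int) 0 = y := by
  rw [PySem.List.pyGetD_natCast]
  simp [List.getD]

theorem inner_run : ∀ (L k : Nat) (rest : List Int),
    (rest = [] ∨ ∃ y ys, rest = y :: ys ∧ y ≠ 1) →
    convertInner (List.replicate k 0 ++ (List.replicate L (1:Int) ++ rest)) 0
      (PySem.List.pyRange (k : Int) ((k + L + rest.length : Nat) : Int) 1)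
    = List.replicate (k + L) 0 ++ rest := by
  intro L
  induction L with
  | zero =>
    intro k rest hrest
    rcases hrest with rfl | ⟨y, ys, rfl, hy⟩
    · simp only [List.replicate_zero, List.append_nil]
      rw [PySem.List.pyRange_one_eq_nil (by simp)]
      rfl
    · rw [PySem.List.pyRange_one_cons (by simp only [List.length_cons]; push_cast; omega)]
      rw [convertInner]
      simp only [List.replicate_zero, List.nil_append, zero_add]
      rw [getD_boundary k 0 y ys]
      rw [if_neg hy]
      simp
  | succ L ih =>
    intro k rest hrest
    rw [PySem.List.pyRange_one_cons (by push_cast; omega)]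
    rw [convertInner, zero_add]
    have hget : PySem.List.pyGetD (List.replicate k (0:Int) ++ (List.replicate (L+1) (1:Int) ++ rest)) (k : Int) 0 = 1 := by
      rw [List.replicate_succ, List.cons_append]
      exact getD_boundary k 0 1 _
    rw [if_pos hget]
    have hset : PySem.List.pySetD (List.replicate k (0:Int) ++ (List.replicate (L+1) (1:Int) ++ rest)) (k : Int) 0
        = List.replicate (k+1) 0 ++ (List.replicate L (1:Int) ++ rest) := by
      rw [PySem.List.pySetD_natCast, List.replicate_succ, List.cons_append,
        List.set_append_right _ _ (by simp)]
      simp [List.replicate_succ']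
    rw [hset]
    have hb : ((k:Int) + 1) = (((k+1 : Nat)) : Int) := by push_cast; ring
    have hb2 : ((k + (L+1) + rest.length : Nat) : Int) = (((k+1) + L + rest.length : Nat) : Int) := by push_cast; ring
    rw [hb, hb2, ih (k+1) rest hrest]
    congr 1
    congr 1
    omega

theorem getD_end (L : Nat) (x : Int) (rest : List Int) :
    PySem.List.pyGetD (List.replicate L x ++ rest) (L : Int) 0 = rest.getD 0 0 := by
  cases rest with
  | nil => rw [PySem.List.pyGetD_natCast]; simp [List.getD]
  | cons y ys => rw [getD_boundary]; rfl

theorem step_id (x : Int) (L : Nat) (rest : List Int)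
    (h : x ≠ 1 ∨ (L ≤ 3 ∧ rest.getD 0 0 ≠ 1))
    (i : Int) (h0 : 0 ≤ i) (hi : i < (L : Int)) :
    convertStep (List.replicate L x ++ rest) i = List.replicate L x ++ rest := by
  rw [convertStep, if_neg]
  intro ⟨h1, h2, h3, h4⟩
  rw [getD_run L x rest i h0 hi] at h1 h2 h3 h4
  subst h4
  rcases h with hx | ⟨hL3, hr1⟩
  · exact hx rfl
  · have hd : (L : Int) = i + 1 ∨ (L : Int) = i + 2 ∨ (L : Int) = i + 3 := by omega
    rcases hd with hd | hd | hd
    · rw [← hd, getD_end] at h1; exact hr1 h1.symm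
    · rw [← hd, getD_end] at h2; exact hr1 h2.symm
    · rw [← hd, getD_end] at h3; exact hr1 h3.symm

theorem step_trigger (L : Nat) (rest : List Int) (hL : 4 ≤ L)
    (hrest : rest = [] ∨ ∃ y ys, rest = y :: ys ∧ y ≠ 1) :
    convertStep (List.replicate L (1:Int) ++ rest) 0 = List.replicate L 0 ++ rest := by
  rw [convertStep, if_pos]
  · have hlen : ((List.replicate L (1:Int) ++ rest).length : Int) - 0
        = ((0 + L + rest.length : Nat) : Int) := by
      simp
    rw [hlen]
    have := inner_run L 0 rest hrest
    simpa using this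
  · refine ⟨?_, ?_, ?_, ?_⟩ <;>
      rw [getD_run L 1 rest _ (by omega) (by omega)] <;>
      rw [getD_run L 1 rest _ (by omega) (by omega)]

theorem alt_nil : convert_alt [] = [] := by rw [convert_alt]

theorem alt_cons (x : Int) (xs : List Int) :
    convert_alt (x :: xs) =
      (if x = 1 ∧ 4 ≤ (xs.takeWhile (fun y => y == x)).length + 1
        then List.replicate ((xs.takeWhile (fun y => y == x)).length + 1) 0
        else x :: xs.takeWhile (fun y => y == x))
      ++ convert_alt (xs.dropWhile (fun y => y == x)) := by
  rw [convert_alt]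

theorem alt_short : ∀ (N : Nat) (s : List Int), s.length ≤ N → s.length ≤ 3 → convert_alt s = s := by
  intro N
  induction N with
  | zero =>
    intro s h _
    have : s = [] := List.length_eq_zero_iff.mp (by omega)
    rw [this]; exact alt_nil
  | succ N ih =>
    intro s hN h3
    cases s with
    | nil => exact alt_nil
    | cons x xs =>
      rw [alt_cons, if_neg]
      · rw [ih _ (by
            have := List.length_dropWhile_le (fun y => y == x) xs
            simp at hN ⊢; omega)
          (by
            have := List.length_dropWhile_le (fun y => y == x) xs
            simp at h3 ⊢; omega)]
        rw [List.cons_append, List.takeWhile_append_dropWhile]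
      · intro ⟨_, hlen⟩
        have := List.Sublist.length_le (List.takeWhile_sublist (l := xs) (fun y => y == x))
        simp at h3
        omega

theorem run_replicate (x : Int) (xs : List Int) :
    x :: xs.takeWhile (fun y => y == x) = List.replicate ((xs.takeWhile (fun y => y == x)).length + 1) x := by
  rw [List.eq_replicate_iff]
  constructor
  · simp
  · intro b hb
    rcases List.mem_cons.mp hb with rfl | hb
    · rfl
    · have := List.mem_takeWhile_imp hb
      simpa using this

theorem dropWhile_head (x : Int) (xs : List Int) :
    xs.dropWhile (fun y => y == x) = [] ∨
      ∃ y ys, xs.dropWhile (fun y => y == x) = y :: ys ∧ y ≠ x := by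
  cases h : xs.dropWhile (fun y => y == x) with
  | nil => exact Or.inl rfl
  | cons y ys =>
    refine Or.inr ⟨y, ys, rfl, ?_⟩
    have := List.head?_dropWhile_not (fun y => y == x) xs
    rw [h] at this
    simpa using this

theorem fold_split (v : Int) (L : Nat) (rest : List Int) (a : Int)
    (_ha0 : 0 ≤ a) (haL : a ≤ (L : Int)) (han : a ≤ (L : Int) + (rest.length : Int) - 3)
    (hid : ∀ i, a ≤ i → i < (L : Int) →
      convertStep (List.replicate L v ++ rest) i = List.replicate L v ++ rest)
    (IH : convert rest = convert_alt rest) :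
    List.foldl convertStep (List.replicate L v ++ rest)
        (PySem.List.pyRange a ((L : Int) + (rest.length : Int) - 3) 1)
      = List.replicate L v ++ convert_alt rest := by
  have hm0 : a ≤ min (L : Int) ((L : Int) + (rest.length : Int) - 3) := le_min haL han
  rw [PySem.List.pyRange_one_append a (min (L : Int) ((L : Int) + (rest.length : Int) - 3)) _
    hm0 (min_le_right _ _), List.foldl_append]
  have hidfold : List.foldl convertStep (List.replicate L v ++ rest)
      (PySem.List.pyRange a (min (L : Int) ((L : Int) + (rest.length : Int) - 3)) 1)
      = List.replicate L v ++ rest :=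
    foldl_fix _ _ _ (fun i hi => by
      have h := PySem.List.mem_pyRange_one.mp hi
      exact hid i h.1 (lt_of_lt_of_le h.2 (min_le_left _ _)))
  rw [hidfold]
  by_cases hc : (L : Int) ≤ (L : Int) + (rest.length : Int) - 3
  · rw [min_eq_left hc]
    have hr2 : PySem.List.pyRange (L : Int) ((L : Int) + (rest.length : Int) - 3) 1
        = (PySem.List.pyRange 0 ((rest.length : Int) - 3) 1).map (fun j => ((L : Int)) + j) := by
      rw [← range_shift]
      congr 1
      ring
    rw [hr2]
    have hsh := fold_shift (PySem.List.pyRange 0 ((rest.length : Int) - 3) 1)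
      (List.replicate L v) rest
      (fun j hj => (PySem.List.mem_pyRange_one.mp hj).1)
    simp only [List.length_replicate] at hsh
    rw [hsh,
      show List.foldl convertStep rest (PySem.List.pyRange 0 ((rest.length : Int) - 3) 1)
        = convert_alt rest from IH]
  · rw [min_eq_right (by omega)]
    rw [PySem.List.pyRange_one_eq_nil le_rfl]
    rw [alt_short rest.length rest le_rfl (by omega)]
    rfl

theorem conv_nil : convert [] = [] := by decide

theorem conv_main : ∀ arr : List Int, convert arr = convert_alt arr := by
  suffices H : ∀ (N : Nat) (arr : List Int), arr.length ≤ N → convert arr = convert_alt arr by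
    intro arr; exact H arr.length arr le_rfl
  intro N
  induction N with
  | zero =>
    intro arr h
    have : arr = [] := List.length_eq_zero_iff.mp (by omega)
    rw [this, conv_nil, alt_nil]
  | succ N ih =>
    intro arr hN
    cases arr with
    | nil => rw [conv_nil, alt_nil]
    | cons x xs =>
      have hxr : x :: xs = List.replicate ((xs.takeWhile (fun y => y == x)).length + 1) x
          ++ xs.dropWhile (fun y => y == x) := by
        rw [← run_replicate, List.cons_append, List.takeWhile_append_dropWhile]
      set r := xs.takeWhile (fun y => y == x) with hr
      set rest := xs.dropWhile (fun y => y == x) with hrd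
      set L : Nat := r.length + 1 with hLdef
      have hN' : xs.length ≤ N := by simpa using hN
      have hrest : rest = [] ∨ ∃ y ys, rest = y :: ys ∧ y ≠ x := hrd ▸ dropWhile_head x xs
      have hL1 : 1 ≤ L := Nat.le_add_left 1 _
      have hlen : xs.length + 1 = L + rest.length := by
        have := congrArg List.length hxr
        simpa using this
      have IH : convert rest = convert_alt rest := ih rest (by omega)
      by_cases hsmall : xs.length + 1 ≤ 3
      · -- list too short: A's outer range is empty, B leaves everything unchanged
        have h1 : convert (x :: xs) = x :: xs := by
          unfold convert
          rw [PySem.List.pyRange_one_eq_nil (by simp only [List.length_cons]; push_cast; omega)]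
          rfl
        rw [h1, alt_short (xs.length + 1) (x :: xs) (by simp) (by simp only [List.length_cons]; omega)]
      · have h4 : 4 ≤ xs.length + 1 := by omega
        have hn1 : (1:Int) ≤ (L : Int) + (rest.length : Int) - 3 := by omega
        have hlenI : (((x :: xs).length : Int) - 3) = (L : Int) + (rest.length : Int) - 3 := by
          simp only [List.length_cons]; push_cast; omega
        by_cases htrig : x = 1 ∧ 4 ≤ L
        · obtain ⟨hx1, hL4⟩ := htrig
          subst hx1
          have hrest1 : rest = [] ∨ ∃ y ys, rest = y :: ys ∧ y ≠ 1 := hrest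
          -- LHS
          have lhs : convert ((1:Int) :: xs) = List.replicate L 0 ++ convert_alt rest := by
            unfold convert
            rw [hlenI, PySem.List.pyRange_one_cons (by omega), List.foldl_cons]
            conv_lhs => rw [hxr]
            rw [show (L : Nat) = (r.length + 1) from rfl] at *
            rw [step_trigger _ rest hL4 hrest1]
            exact fold_split 0 _ rest 1 (by omega) (by exact_mod_cast hL4.trans' (by omega)) hn1
              (fun i h1i hiL => step_id 0 _ rest (Or.inl (by norm_num)) i (by omega) hiL) IH
          rw [lhs, alt_cons, if_pos ⟨rfl, hL4⟩]
        · -- non-trigger: every outer-loop step in the first run is a no-op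
          have hr1 : x = 1 → rest.getD 0 0 ≠ 1 := by
            intro hx1
            rcases hrest with hre | ⟨y, ys, hre, hy⟩
            · rw [hre]; simp
            · rw [hre]; simpa using hx1 ▸ hy
          have hid : ∀ i, (0:Int) ≤ i → i < (L : Int) →
              convertStep (List.replicate L x ++ rest) i = List.replicate L x ++ rest := by
            intro i h0 hiL
            by_cases hx1 : x = 1
            · have hL3 : L ≤ 3 := by
                by_contra hc
                exact htrig ⟨hx1, by omega⟩
              exact step_id x L rest (Or.inr ⟨hL3, hx1 ▸ hr1 hx1⟩) i h0 hiL
            · exact step_id x L rest (Or.inl hx1) i h0 hiL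
          have lhs : convert (x :: xs) = List.replicate L x ++ convert_alt rest := by
            unfold convert
            rw [hlenI]
            conv_lhs => rw [hxr]
            exact fold_split x L rest 0 le_rfl (by positivity) (by omega) hid IH
          rw [lhs, alt_cons, if_neg htrig]
          rw [run_replicate]

-- ===== VERDICT (by name: the statement is the Claim_ definition above) =====
theorem convert_spec : Claim_equal_convert := by
  intro array _
  unfold Spec_convert
  exact conv_main array
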